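-- pv_equiv track=rewrite | github.com/posl/comment_recommendation | script/split_gen/5_time/zh/197_C/7.py | get_min_xor
-- ===== SOURCE A (Python) =====
-- def get_min_xor(a):
--     n = len(a)
--     if n == 1:
--         return a[0]
--     elif n == 2:
--         return a[0]^a[1]
--     else:
--         min_xor = 2**30
--         for i in range(1,n):
--             xor = get_min_xor(a[:i])^get_min_xor(a[i:])
--             if xor < min_xor:
--                 min_xor = xor
--         return min_xor
-- ===== SOURCE B (Python) =====
-- def get_min_xor(a):
--     # Bottom-up interval DP over (start, length) subarrays instead of A's
--     # exponential recursion over all split points.  Raises IndexError on [].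
--     n = len(a)
--     cap = 1 << 30
--     layers = [list(a)]                    # layers[L-1][i] = answer for a[i:i+L]
--     if 2 <= n:
--         layers = layers + [[a[i] ^ a[i + 1] for i in range(n - 1)]]
--     for L in range(3, n + 1):
--         def value(i):
--             best = cap
--             for k in range(1, L):
--                 v = layers[k - 1][i] ^ layers[L - k - 1][i + k]
--                 if v < best:
--                     best = v
--             return best
--         layers = layers + [[value(i) for i in range(n - L + 1)]]
--     return layers[n - 1][0]
-- ===== Notes on version B (the rewrite author's own statement) =====
-- stated objective: faster
-- what changed: Replaced A's exponential recursion over all contiguous split points by a bottom-up interval dynamic program that fills a layers table indexed by (start, length), so every subarray value is computed once.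
-- outside the precondition, e.g. on get_min_xor([]): A returns 1073741824, B raises IndexError
import Mathlib
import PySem

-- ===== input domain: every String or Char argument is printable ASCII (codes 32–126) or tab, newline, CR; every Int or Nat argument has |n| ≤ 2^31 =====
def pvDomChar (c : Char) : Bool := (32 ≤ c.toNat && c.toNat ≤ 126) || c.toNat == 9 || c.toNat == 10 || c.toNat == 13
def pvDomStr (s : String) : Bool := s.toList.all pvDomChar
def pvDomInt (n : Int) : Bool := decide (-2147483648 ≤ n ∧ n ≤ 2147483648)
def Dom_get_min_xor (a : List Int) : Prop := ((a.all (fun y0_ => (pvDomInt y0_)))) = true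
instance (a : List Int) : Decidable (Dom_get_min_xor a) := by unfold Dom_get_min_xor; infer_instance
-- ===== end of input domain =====

-- B replaces A's exponential recursion over all split points by a bottom-up interval DP
-- over (start, length) windows; objective: faster (asymptotic). Pre_ excludes only the
-- empty list, where A returns its never-updated sentinel 2**30 and B raises IndexError.


-- ===== PORT A =====
-- A's recursion, made total with a fuel argument; fuel > len a reproduces A exactly
def gmxFuel : Nat → List Int → Int
  | 0, _ => 0
  | fuel+1, a =>
    let n : Int := (a.length : Int)
    if n = 1 then PySem.List.pyGetD a 0 0
    else if n = 2 then PySem.Int.bxor (PySem.List.pyGetD a 0 0) (PySem.List.pyGetD a 1 0)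
    else
      (PySem.List.pyRange 1 n 1).foldl (fun min_xor i =>
        let xor := PySem.Int.bxor (gmxFuel fuel (PySem.List.slice a none (some i)))
                                  (gmxFuel fuel (PySem.List.slice a (some i) none))
        if xor < min_xor then xor else min_xor) (2^30)

def get_min_xor (a : List Int) : Int := gmxFuel (a.length + 1) a

-- ===== PORT B =====
def get_min_xor_alt (a : List Int) : Int :=
  let n := a.length
  let cap : Int := (1 : Int) <<< 30
  let layers : List (List Int) := [a]
  let layers :=
    if 2 ≤ n then
      layers ++ [(PySem.List.pyRange 0 ((n : Int) - 1) 1).map (fun i =>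
        PySem.Int.bxor (PySem.List.pyGetD a i 0) (PySem.List.pyGetD a (i + 1) 0))]
    else layers
  let layers :=
    (PySem.List.pyRange 3 ((n : Int) + 1) 1).foldl (fun layers L =>
      layers ++ [(PySem.List.pyRange 0 ((n : Int) - L + 1) 1).map (fun i =>
        (PySem.List.pyRange 1 L 1).foldl (fun best k =>
          let v := PySem.Int.bxor
            (PySem.List.pyGetD (PySem.List.pyGetD layers (k - 1) []) i 0)
            (PySem.List.pyGetD (PySem.List.pyGetD layers (L - k - 1) []) (i + k) 0)
          if v < best then v else best) cap)]) layers
  PySem.List.pyGetD (PySem.List.pyGetD layers ((n : Int) - 1) []) 0 0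

-- ===== PRECONDITION & SPEC =====
-- Pre_ excludes the empty list: A returns its never-updated loop sentinel 2**30 there
-- (an artefact of the loop running zero times), while B's DP table lookup raises IndexError.
def Pre_get_min_xor (a : List Int) : Prop := a ≠ []
instance (a : List Int) : Decidable (Pre_get_min_xor a) := by unfold Pre_get_min_xor; infer_instance
def pvWitness_get_min_xor : List Int := [1, 2, 3]

def Spec_get_min_xor (a : List Int) (out : Int) : Prop := out = get_min_xor_alt a
instance (a : List Int) (out : Int) : Decidable (Spec_get_min_xor a out) := by unfold Spec_get_min_xor; infer_instance

-- ===== CLAIM (what is proved, stated in full; the proofs are below) =====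
def Claim_equal_get_min_xor : Prop := ∀ (a : List Int), Dom_get_min_xor a → Pre_get_min_xor a → Spec_get_min_xor a (get_min_xor a)

-- ===== LEMMAS AND PROOFS =====
lemma gmx_one (s : List Int) (h : s.length = 1) : get_min_xor s = s.getD 0 0 := by
  simp [get_min_xor, h, gmxFuel, PySem.List.pyGetD_zero]

lemma gmx_two (s : List Int) (h : s.length = 2) :
    get_min_xor s = PySem.Int.bxor (s.getD 0 0) (s.getD 1 0) := by
  simp [get_min_xor, h, gmxFuel, pysem]

lemma getD_drop_take (a : List Int) (i L j : Nat) (hj : j < L) (_h : i + L ≤ a.length) :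
    ((a.drop i).take L).getD j 0 = a.getD (i + j) 0 := by
  rw [List.getD_eq_getElem?_getD, List.getD_eq_getElem?_getD]
  rw [List.getElem?_take_of_lt hj, List.getElem?_drop]

lemma foldl_range_inv {β : Type} (f : β → Int → β) (Q : Nat → β → Prop) (m : Int) :
    ∀ (k : Nat) (s : β), Q 0 s →
      (∀ (j : Nat) (s' : β), j < k → Q j s' → Q (j+1) (f s' (m + j))) →
      Q k ((PySem.List.pyRange m (m + k) 1).foldl f s) := by
  intro k
  induction k with
  | zero => intro s h0 _; simpa using h0
  | succ k ih =>
    intro s h0 hstep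
    have hsplit : PySem.List.pyRange m (m + (k+1 : Nat)) 1
        = PySem.List.pyRange m (m + k) 1 ++ [m + k] := by
      have : (m + ((k:Int)+1)) = (m + k) + 1 := by ring
      rw [show (m + ((k+1:Nat):Int)) = (m + (k:Int)) + 1 by push_cast; ring]
      exact PySem.List.pyRange_one_succ_right (by omega)
    rw [hsplit, List.foldl_append]
    simp only [List.foldl_cons, List.foldl_nil]
    exact hstep k _ (by omega) (ih s h0 (fun j s' hj => hstep j s' (by omega)))

lemma gmxFuel_irrel : ∀ (f1 : Nat) (a : List Int) (f2 : Nat),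
    a.length < f1 → a.length < f2 → gmxFuel f1 a = gmxFuel f2 a := by
  intro f1
  induction f1 with
  | zero => intro a f2 h1; omega
  | succ g1 ih =>
    intro a f2 h1 h2
    cases f2 with
    | zero => omega
    | succ g2 =>
      simp only [gmxFuel]
      split_ifs with hn1 hn2
      · rfl
      · rfl
      · apply PySem.List.foldl_congr_mem
        intro acc i hi
        have hmem := (PySem.List.mem_pyRange_one).1 hi
        have h1i : 1 ≤ i := hmem.1
        have h2i : i < (a.length : Int) := hmem.2
        have h0i : (0:Int) ≤ i := by omega
        rw [PySem.List.slice_to a h0i, PySem.List.slice_from a h0i]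
        rw [ih (a.take i.toNat) g2 (by simp; omega) (by simp; omega),
            ih (a.drop i.toNat) g2 (by simp; omega) (by simp; omega)]

lemma gmx_ge3 (s : List Int) (h : 3 ≤ s.length) :
    get_min_xor s = (PySem.List.pyRange 1 (s.length : Int) 1).foldl (fun m i =>
      let x := PySem.Int.bxor (get_min_xor (s.take i.toNat)) (get_min_xor (s.drop i.toNat))
      if x < m then x else m) (2^30) := by
  conv_lhs => rw [get_min_xor, show s.length + 1 = (s.length - 1) + 1 + 1 by omega, gmxFuel]
  rw [if_neg (by omega), if_neg (by omega)]
  apply PySem.List.foldl_congr_mem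
  intro acc i hi
  have hmem := (PySem.List.mem_pyRange_one).1 hi
  have h1i : 1 ≤ i := hmem.1
  have h2i : i < (s.length : Int) := hmem.2
  have h0i : (0:Int) ≤ i := by omega
  rw [PySem.List.slice_to s h0i, PySem.List.slice_from s h0i]
  rw [gmxFuel_irrel ((s.length - 1) + 1) (s.take i.toNat) ((s.take i.toNat).length + 1) (by simp; omega) (by omega),
      gmxFuel_irrel ((s.length - 1) + 1) (s.drop i.toNat) ((s.drop i.toNat).length + 1) (by simp; omega) (by omega)]
  rfl

def gmxInv (a : List Int) (j : Nat) (layers : List (List Int)) : Prop :=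
  layers.length = j + 2 ∧
  ∀ L i : Nat, 1 ≤ L → L ≤ j + 2 → i + L ≤ a.length →
    (layers.getD (L-1) []).getD i 0 = get_min_xor ((a.drop i).take L)

lemma gmxInv_base (a : List Int) (h2 : 2 ≤ a.length) :
    gmxInv a 0 [a, (PySem.List.pyRange 0 ((a.length : Int) - 1) 1).map (fun i =>
      PySem.Int.bxor (PySem.List.pyGetD a i 0) (PySem.List.pyGetD a (i + 1) 0))] := by
  refine ⟨rfl, ?_⟩
  intro L i hL1 hL2 hiL
  interval_cases L
  · rw [gmx_one _ (by simp [List.length_take, List.length_drop]; omega)]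
    rw [getD_drop_take a i 1 0 (by omega) (by omega)]
    simp
  · rw [gmx_two _ (by simp [List.length_take, List.length_drop]; omega)]
    rw [getD_drop_take a i 2 0 (by omega) (by omega),
        getD_drop_take a i 2 1 (by omega) (by omega)]
    simp only [List.getD_cons_succ, List.getD_cons_zero]
    rw [show ((a.length : Int) - 1) = ((a.length - 1 : Nat) : Int) by omega]
    rw [← PySem.List.pyGetD_natCast _ i (0:Int),
        PySem.List.pyGetD_map_pyRange _ (a.length - 1) i 0 (by omega)]
    rw [PySem.List.pyGetD_natCast,
        show ((i:Int)+1) = ((i+1:Nat):Int) by push_cast; ring,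
        PySem.List.pyGetD_natCast]
    simp

lemma cur_eq (a : List Int) (j : Nat) (layers : List (List Int))
    (hinv : gmxInv a j layers) (i : Nat) (hi : i + (j+3) ≤ a.length) :
    (PySem.List.pyRange 1 (3 + (j:Int)) 1).foldl (fun best k =>
        let v := PySem.Int.bxor
          (PySem.List.pyGetD (PySem.List.pyGetD layers (k - 1) []) (i:Int) 0)
          (PySem.List.pyGetD (PySem.List.pyGetD layers (3 + (j:Int) - k - 1) []) ((i:Int) + k) 0)
        if v < best then v else best) ((1:Int) <<< 30)
    = get_min_xor ((a.drop i).take (j+3)) := by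
  have hsl : ((a.drop i).take (j+3)).length = j + 3 := by
    simp [List.length_take, List.length_drop]; omega
  rw [gmx_ge3 _ (by omega), hsl]
  rw [show ((j+3 : Nat) : Int) = 3 + (j:Int) by push_cast; ring]
  rw [show ((1:Int) <<< 30) = 2^30 by decide]
  apply PySem.List.foldl_congr_mem
  intro acc k hk
  have hmem := (PySem.List.mem_pyRange_one).1 hk
  have hk1 : 1 ≤ k := hmem.1
  have hk2 : k < 3 + (j:Int) := hmem.2
  have hLk : ((k.toNat : Nat) : Int) = k := by omega
  -- B side: resolve the two table lookups
  rw [PySem.List.pyGetD_of_nonneg layers ([] : List Int) (show (0:Int) ≤ k - 1 by omega),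
      PySem.List.pyGetD_of_nonneg layers ([] : List Int) (show (0:Int) ≤ 3 + (j:Int) - k - 1 by omega),
      PySem.List.pyGetD_natCast,
      show ((i:Int) + k) = ((i + k.toNat : Nat) : Int) by omega,
      PySem.List.pyGetD_natCast,
      show (k - 1).toNat = k.toNat - 1 by omega,
      show (3 + (j:Int) - k - 1).toNat = (j + 3 - k.toNat) - 1 by omega]
  rw [hinv.2 k.toNat i (by omega) (by omega) (by omega),
      hinv.2 (j + 3 - k.toNat) (i + k.toNat) (by omega) (by omega) (by omega)]
  -- A side: the two slices of the window
  rw [List.take_take, min_eq_left (by omega : k.toNat ≤ j + 3)]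
  rw [List.drop_take, List.drop_drop]

lemma gmxInv_step (a : List Int) (j : Nat) (layers : List (List Int))
    (hj : j + 3 ≤ a.length) (hinv : gmxInv a j layers) :
    gmxInv a (j+1) (layers ++ [(PySem.List.pyRange 0 ((a.length : Int) - (3 + (j:Int)) + 1) 1).map (fun i =>
      (PySem.List.pyRange 1 (3 + (j:Int)) 1).foldl (fun best k =>
        let v := PySem.Int.bxor
          (PySem.List.pyGetD (PySem.List.pyGetD layers (k - 1) []) i 0)
          (PySem.List.pyGetD (PySem.List.pyGetD layers (3 + (j:Int) - k - 1) []) (i + k) 0)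
        if v < best then v else best) ((1:Int) <<< 30))]) := by
  refine ⟨by simp [hinv.1], ?_⟩
  intro L i hL1 hL2 hiL
  by_cases hL : L ≤ j + 2
  · rw [List.getD_append _ _ _ _ (by rw [hinv.1]; omega)]
    exact hinv.2 L i hL1 hL hiL
  · have hL3 : L = j + 3 := by omega
    subst hL3
    have hcur : ∀ (cur : List Int), (layers ++ [cur]).getD (j + 3 - 1) [] = cur := by
      intro cur
      rw [List.getD_eq_getElem?_getD, List.getElem?_append_right (by rw [hinv.1]; omega)]
      simp [hinv.1]
    rw [hcur]
    rw [show ((a.length : Int) - (3 + (j:Int)) + 1) = ((a.length - j - 2 : Nat) : Int) by omega]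
    rw [← PySem.List.pyGetD_natCast _ i (0:Int),
        PySem.List.pyGetD_map_pyRange _ (a.length - j - 2) i 0 (by omega)]
    exact cur_eq a j layers hinv i hiL

theorem main_eq (a : List Int) (h : a ≠ []) : get_min_xor a = get_min_xor_alt a := by
  have hn : 1 ≤ a.length := List.length_pos_of_ne_nil h
  simp only [get_min_xor_alt]
  by_cases h1 : a.length = 1
  · rw [if_neg (by omega)]
    rw [show PySem.List.pyRange 3 ((a.length:Int)+1) 1 = [] from PySem.List.pyRange_one_eq_nil (by omega)]
    simp only [List.foldl_nil]
    rw [PySem.List.pyGetD_of_nonneg _ ([] : List Int) (show (0:Int) ≤ (a.length:Int) - 1 by omega),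
        show ((a.length:Int) - 1).toNat = 0 by omega,
        List.getD_cons_zero, PySem.List.pyGetD_zero, gmx_one a h1]
  · by_cases h2 : a.length = 2
    · rw [if_pos (by omega)]
      rw [show PySem.List.pyRange 3 ((a.length:Int)+1) 1 = [] from PySem.List.pyRange_one_eq_nil (by omega)]
      simp only [List.foldl_nil]
      have base := gmxInv_base a (by omega)
      have h22 := base.2 2 0 (by omega) (by omega) (by omega)
      simp only [List.drop_zero] at h22
      rw [show (2:Nat) - 1 = 1 from rfl] at h22
      rw [PySem.List.pyGetD_of_nonneg _ ([] : List Int) (show (0:Int) ≤ (a.length:Int) - 1 by omega),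
          show ((a.length:Int) - 1).toNat = 1 by omega,
          PySem.List.pyGetD_zero]
      simp only [List.singleton_append]
      rw [h22, List.take_of_length_le (by omega)]
    · have h3 : 3 ≤ a.length := by omega
      rw [if_pos (by omega)]
      rw [show ((a.length : Int) + 1) = 3 + ((a.length - 2 : Nat) : Int) by omega]
      simp only [List.singleton_append]
      have key := foldl_range_inv
        (fun layers L =>
          layers ++ [(PySem.List.pyRange 0 ((a.length : Int) - L + 1) 1).map (fun i =>
            (PySem.List.pyRange 1 L 1).foldl (fun best k =>
              let v := PySem.Int.bxor
                (PySem.List.pyGetD (PySem.List.pyGetD layers (k - 1) []) i 0)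
                (PySem.List.pyGetD (PySem.List.pyGetD layers (L - k - 1) []) (i + k) 0)
              if v < best then v else best) ((1:Int) <<< 30))])
        (fun j layers => gmxInv a j layers) 3 (a.length - 2)
        _ (gmxInv_base a (by omega))
        (fun j layers hj hQ => gmxInv_step a j layers (by omega) hQ)
      rw [PySem.List.pyGetD_of_nonneg _ ([] : List Int) (show (0:Int) ≤ (a.length:Int) - 1 by omega),
          show ((a.length:Int) - 1).toNat = a.length - 1 by omega,
          PySem.List.pyGetD_zero]
      have hfin := key.2 a.length 0 (by omega) (by omega) (by omega)
      simp only [List.drop_zero, List.take_length] at hfin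
      exact hfin.symm

-- ===== VERDICT (by name: the statement is the Claim_ definition above) =====
theorem get_min_xor_spec : Claim_equal_get_min_xor := by
  intro a _ hpre
  unfold Spec_get_min_xor
  exact main_eq a hpre
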